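-- pv_equiv track=rewrite | github.com/liqiming-whu/FirstAuthor-Mine | famine/search_pubmed.py | replace_tags
-- ===== SOURCE A (Python) =====
-- def replace_tags(text, reverse=False):
--     tags = ['<sup>', '</sup>', '<sub>', '</sub>', '<i>', '</i>']
--     re_tags = ['[^', '^]', '[_', '_]', '[/', '/]']
--     for tag, re_tag in zip(tags, re_tags):
--         if reverse:
--             text = text.replace(re_tag, tag)
--         else:
--             text = text.replace(tag, re_tag)
--
--     return text
-- ===== SOURCE B (Python) =====
-- def replace_tags(text, reverse=False):
--     tags = ['<sup>', '</sup>', '<sub>', '</sub>', '<i>', '</i>']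
--     re_tags = ['[^', '^]', '[_', '_]', '[/', '/]']
--     mapping = list(zip(re_tags, tags)) if reverse else list(zip(tags, re_tags))
--     out = []
--     i = 0
--     n = len(text)
--     while i < n:
--         for src, dst in mapping:
--             if text.startswith(src, i):
--                 out.append(dst)
--                 i += len(src)
--                 break
--         else:
--             out.append(text[i])
--             i += 1
--     return ''.join(out)
-- ===== Notes on version B (the rewrite author's own statement) =====
-- stated objective: alternative
-- what changed: B makes a single left-to-right pass over the text with a token table for the selected direction (first matching token at each position is emitted as its translation), instead of A's six sequential full-string replace passes; exact because no token is a prefix of another and replacements never create or overlap source tokens.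
import Mathlib
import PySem

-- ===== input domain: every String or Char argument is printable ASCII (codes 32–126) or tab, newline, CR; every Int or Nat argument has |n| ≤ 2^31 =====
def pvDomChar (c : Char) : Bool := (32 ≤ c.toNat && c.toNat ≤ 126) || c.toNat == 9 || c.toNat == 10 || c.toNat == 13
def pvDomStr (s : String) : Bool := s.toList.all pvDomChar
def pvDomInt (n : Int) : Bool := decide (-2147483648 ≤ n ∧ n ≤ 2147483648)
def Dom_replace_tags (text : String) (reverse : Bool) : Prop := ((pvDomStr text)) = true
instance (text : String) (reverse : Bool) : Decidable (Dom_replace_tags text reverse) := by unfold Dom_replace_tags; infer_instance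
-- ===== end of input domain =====

-- B replaces A's six sequential full-string replace passes by ONE left-to-right pass over the
-- text with a token table for the selected direction (objective: alternative algorithm).

-- ===== PORT A =====
def replace_tags (text : String) (reverse : Bool) : String :=
  let tags := ["<sup>", "</sup>", "<sub>", "</sub>", "<i>", "</i>"]
  let re_tags := ["[^", "^]", "[_", "_]", "[/", "/]"]
  (tags.zip re_tags).foldl
    (fun t pr => if reverse then PySem.Str.replace t pr.2 pr.1 else PySem.Str.replace t pr.1 pr.2)
    text

-- ===== PORT B =====
-- the single left-to-right pass of Source B: at each position try the table's tokens in order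
-- (the inner for/str.startswith(src, i) loop = List.find? with isPrefixOf on the remaining
-- characters); on a match emit the translation and skip the token (i += len(src)), else copy
-- one character
def pvScan (prs : List (List Char × List Char)) : List Char → List Char
  | [] => []
  | c :: t =>
    match prs.find? (fun pr => pr.1.isPrefixOf (c :: t)) with
    | some pr => pr.2 ++ pvScan prs (t.drop (pr.1.length - 1))
    | none => c :: pvScan prs t
termination_by s => s.length
decreasing_by
  · simp only [List.length_cons]
    have : (List.drop (pr.1.length - 1) t).length ≤ t.length := by
      rw [List.length_drop]; exact Nat.sub_le _ _
    omega
  · simp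

def replace_tags_alt (text : String) (reverse : Bool) : String :=
  let tags := ["<sup>", "</sup>", "<sub>", "</sub>", "<i>", "</i>"]
  let re_tags := ["[^", "^]", "[_", "_]", "[/", "/]"]
  let mapping := if reverse then re_tags.zip tags else tags.zip re_tags
  String.ofList (pvScan (mapping.map (fun pr => (pr.1.toList, pr.2.toList))) text.toList)

-- ===== PRECONDITION & SPEC =====
def Spec_replace_tags (text : String) (reverse : Bool) (out : String) : Prop := out = replace_tags_alt text reverse
instance (text : String) (reverse : Bool) (out : String) : Decidable (Spec_replace_tags text reverse out) := by unfold Spec_replace_tags; infer_instance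

-- ===== CLAIM (what is proved, stated in full; the proofs are below) =====
def Claim_equal_replace_tags : Prop := ∀ (text : String) (reverse : Bool), Dom_replace_tags text reverse → Spec_replace_tags text reverse (replace_tags text reverse)

-- ===== LEMMAS AND PROOFS =====

-- clean recursion computing Python's str.replace for a NONEMPTY pattern (the guard carries old ≠ [])
def pvRep (old new : List Char) : List Char → List Char
  | [] => []
  | c :: t =>
    if h : old.isPrefixOf (c :: t) ∧ old ≠ [] then
      new ++ pvRep old new ((c :: t).drop old.length)
    else
      c :: pvRep old new t
termination_by s => s.length
decreasing_by
  · have hlen : 0 < old.length := List.length_pos_iff.mpr h.2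
    simp only [List.length_drop, List.length_cons]
    omega
  · simp

-- chained replaces over a pair list (A's loop, at the char-list level)
def pvChain (prs : List (List Char × List Char)) (s : List Char) : List Char :=
  prs.foldl (fun t pr => pvRep pr.1 pr.2 t) s

-- two tokens overlap (one is a prefix of the other)
def pvCompat (u v : List Char) : Prop := u <+: v ∨ v <+: u

-- the no-overlap facts about the two concrete token tables, bundled
def pvGood (prs : List (List Char × List Char)) : Prop :=
  (∀ pr ∈ prs, pr.1 ≠ []) ∧
  (∀ pr ∈ prs, ∀ qr ∈ prs, ∀ j, j < pr.1.length → 1 ≤ j → ¬ pvCompat (pr.1.drop j) qr.2) ∧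
  (prs.Pairwise (fun pr qr => ∀ j, j < qr.1.length → 1 ≤ j → ¬ pvCompat (qr.1.drop j) pr.1)) ∧
  (∀ pr ∈ prs, ∀ qr ∈ prs, pr.1 ≠ qr.1 → ¬ pvCompat pr.1 qr.1) ∧
  (∀ pr ∈ prs, ∀ qr ∈ prs, ∀ j, j < pr.2.length → ¬ pvCompat (pr.2.drop j) qr.1) ∧
  (prs.map Prod.fst).Nodup

theorem pvGood_tail {pd : List Char × List Char} {rest : List (List Char × List Char)}
    (h : pvGood (pd :: rest)) : pvGood rest := by
  obtain ⟨h1, h2, h3, h4, h5, h6⟩ := h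
  exact ⟨fun pr hp => h1 pr (by simp [hp]),
    fun pr hp qr hq j hj h1j => h2 pr (by simp [hp]) qr (by simp [hq]) j hj h1j,
    (List.pairwise_cons.mp h3).2,
    fun pr hp qr hq => h4 pr (by simp [hp]) qr (by simp [hq]),
    fun pr hp qr hq j hj => h5 pr (by simp [hp]) qr (by simp [hq]) j hj,
    (List.nodup_cons.mp h6).2⟩

theorem pvRep_eq_go (old new : List Char) (h : old ≠ []) :
    ∀ (fuel : Nat) (l acc : List Char), l.length ≤ fuel →
      PySem.Chars.replace.go old new fuel l acc = acc.reverse ++ pvRep old new l := by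
  intro fuel
  induction fuel with
  | zero =>
    intro l acc hl
    have hnil : l = [] := List.eq_nil_of_length_eq_zero (Nat.le_zero.mp hl)
    subst hnil
    simp [PySem.Chars.replace.go, pvRep]
  | succ n ih =>
    intro l acc hl
    cases l with
    | nil => simp [PySem.Chars.replace.go, pvRep]
    | cons c t =>
      by_cases hp : old.isPrefixOf (c :: t)
      · have hlen : 0 < old.length := List.length_pos_iff.mpr h
        have hdrop : ((c :: t).drop old.length).length ≤ n := by
          simp only [List.length_drop, List.length_cons]
          simp only [List.length_cons] at hl
          omega
        rw [show PySem.Chars.replace.go old new (n + 1) (c :: t) acc =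
            PySem.Chars.replace.go old new n ((c :: t).drop old.length) (new.reverse ++ acc) from by
          simp [PySem.Chars.replace.go, hp]]
        rw [ih _ _ hdrop, pvRep, dif_pos ⟨hp, h⟩]
        simp
      · have ht : t.length ≤ n := by simp only [List.length_cons] at hl; omega
        rw [show PySem.Chars.replace.go old new (n + 1) (c :: t) acc =
            PySem.Chars.replace.go old new n t (c :: acc) from by
          simp [PySem.Chars.replace.go, hp]]
        rw [ih _ _ ht, pvRep, dif_neg (fun hc => hp hc.1)]
        simp

theorem replace_eq_pvRep (s old new : List Char) (h : old ≠ []) :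
    PySem.Chars.replace s old new = pvRep old new s := by
  have he : old.isEmpty = false := by cases old <;> simp_all
  rw [PySem.Chars.replace, he]
  simpa using pvRep_eq_go old new h s.length s [] le_rfl

-- a prefix of an append is a prefix of, or extends, the left part
theorem prefix_append_cases {x w y : List Char} (h : x <+: w ++ y) : x <+: w ∨ w <+: x := by
  rcases h with ⟨r, hr⟩
  rcases Nat.le_total x.length w.length with hle | hle
  · left
    have hx : x = (w ++ y).take x.length := by rw [← hr]; simp
    rw [hx, List.take_append_of_le_length hle]
    exact List.take_prefix _ _
  · right
    refine ⟨x.drop w.length, ?_⟩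
    have hx : x = (w ++ y).take x.length := by rw [← hr]; simp
    have hw : x.take w.length = w := by
      rw [hx, List.take_take, Nat.min_eq_left hle, List.take_left]
    calc w ++ x.drop w.length
        = x.take w.length ++ x.drop w.length := by rw [hw]
      _ = x := List.take_append_drop _ _

-- (G) a token tail that cannot overlap the replacement text passes through pvRep
theorem pvRep_prefix_back (p d : List Char) :
    ∀ (b x : List Char), (∀ j, j < x.length → ¬ pvCompat (x.drop j) d) →
      x <+: pvRep p d b → x <+: b := by
  intro b
  induction b with
  | nil =>
    intro x hx hpre
    simpa [pvRep] using hpre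
  | cons c t ih =>
    intro x hx hpre
    ( 
      by_cases hg : p.isPrefixOf (c :: t) ∧ p ≠ []
      · rw [pvRep, dif_pos hg] at hpre
        cases x with
        | nil => exact List.nil_prefix
        | cons x0 xs =>
          exact absurd (prefix_append_cases hpre) (hx 0 (by simp))
      · rw [pvRep, dif_neg hg] at hpre
        cases x with
        | nil => exact List.nil_prefix
        | cons x0 xs =>
          rcases List.cons_prefix_cons.mp hpre with ⟨hc, hxs⟩
          subst hc
          have hxt : xs <+: t := by
            refine ih xs ?_ hxs
            intro j hj
            exact hx (j + 1) (by simpa using Nat.succ_lt_succ hj)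
          exact List.cons_prefix_cons.mpr ⟨rfl, hxt⟩ )

-- (H) pvRep commutes with an append whose left part admits no pattern match
theorem pvRep_append (p d : List Char) :
    ∀ (w b : List Char), (∀ j, j < w.length → ¬ p <+: (w.drop j ++ b)) →
      pvRep p d (w ++ b) = w ++ pvRep p d b := by
  intro w
  induction w with
  | nil => intro b _; simp
  | cons c w' ihw =>
    intro b hw
    have h0 : ¬ p <+: (c :: w' ++ b) := by simpa using hw 0 (by simp)
    rw [List.cons_append, pvRep, dif_neg (fun hc => h0 (List.isPrefixOf_iff_prefix.mp hc.1))]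
    rw [ihw b (fun j hj => by simpa using hw (j + 1) (by simpa using Nat.succ_lt_succ hj))]
    simp

-- a matched token at the front is rewritten
theorem pvRep_matched (p d b : List Char) (h : p ≠ []) :
    pvRep p d (p ++ b) = d ++ pvRep p d b := by
  cases hp : p with
  | nil => exact absurd hp h
  | cons c t =>
    subst hp
    rw [List.cons_append, pvRep,
      dif_pos ⟨List.isPrefixOf_iff_prefix.mpr (by exact ⟨b, by simp⟩), h⟩]
    simp

theorem pvChain_nil (prs : List (List Char × List Char)) : pvChain prs [] = [] := by
  induction prs with
  | nil => rfl
  | cons pr rest ih => simpa [pvChain, pvRep, List.foldl_cons] using ih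

-- (CONS) no token matches at the front: the whole chain keeps the first character
theorem pvChain_cons (prs : List (List Char × List Char)) (hG : pvGood prs) :
    ∀ (c : Char) (t : List Char), (∀ pr ∈ prs, ¬ pr.1 <+: c :: t) →
      pvChain prs (c :: t) = c :: pvChain prs t := by
  induction prs with
  | nil => intro c t _; rfl
  | cons pd rest ih =>
    intro c t hnp
    have h0 : ¬ pd.1 <+: c :: t := hnp pd (by simp)
    have step : pvRep pd.1 pd.2 (c :: t) = c :: pvRep pd.1 pd.2 t := by
      rw [pvRep, dif_neg (fun hc => h0 (List.isPrefixOf_iff_prefix.mp hc.1))]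
    have hnp' : ∀ pr ∈ rest, ¬ pr.1 <+: c :: pvRep pd.1 pd.2 t := by
      intro pr hm hpre
      cases hq : pr.1 with
      | nil => exact hG.1 pr (by simp [hm]) hq
      | cons q0 qs =>
        rw [hq] at hpre
        rcases List.cons_prefix_cons.mp hpre with ⟨hc, hqs⟩
        subst hc
        have hback : qs <+: t := by
          refine pvRep_prefix_back pd.1 pd.2 t qs ?_ hqs
          intro j hj
          have := hG.2.1 pr (by simp [hm]) pd (by simp) (j + 1)
            (by rw [hq]; simpa using Nat.succ_lt_succ hj) (by omega)
          rw [hq] at this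
          simpa using this
        exact hnp pr (by simp [hm]) (by rw [hq]; exact List.cons_prefix_cons.mpr ⟨rfl, hback⟩)
    calc pvChain (pd :: rest) (c :: t)
        = pvChain rest (c :: pvRep pd.1 pd.2 t) := by unfold pvChain; rw [List.foldl_cons, step]
      _ = c :: pvChain rest (pvRep pd.1 pd.2 t) := ih (pvGood_tail hG) _ _ hnp'
      _ = c :: pvChain (pd :: rest) t := rfl

-- (APP) the whole chain passes over a block no token can overlap
theorem pvChain_append (prs : List (List Char × List Char)) :
    ∀ (w b : List Char),
      (∀ pr ∈ prs, ∀ j, j < w.length → ¬ pvCompat (w.drop j) pr.1) →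
      pvChain prs (w ++ b) = w ++ pvChain prs b := by
  induction prs with
  | nil => intro w b _; rfl
  | cons pd rest ih =>
    intro w b hw
    have step : pvRep pd.1 pd.2 (w ++ b) = w ++ pvRep pd.1 pd.2 b := by
      refine pvRep_append pd.1 pd.2 w b ?_
      intro j hj hpre
      rcases prefix_append_cases hpre with h | h
      · exact hw pd (by simp) j hj (Or.inr h)
      · exact hw pd (by simp) j hj (Or.inl h)
    rw [pvChain, List.foldl_cons, step]
    exact ih w (pvRep pd.1 pd.2 b) (fun pr hp j hj => hw pr (by simp [hp]) j hj)

-- (MATCH) a token at the front of the string is rewritten by the chain exactly once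
theorem pvChain_match (prs : List (List Char × List Char)) (hG : pvGood prs) :
    ∀ (u v b : List Char), (u, v) ∈ prs →
      pvChain prs (u ++ b) = v ++ pvChain prs b := by
  induction prs with
  | nil => intro u v b hm; cases hm
  | cons pd rest ih =>
    intro u v b hm
    by_cases hpu : pd.1 = u
    · have hdv : pd.2 = v := by
        rcases List.mem_cons.mp hm with he | hr
        · rw [← he]
        · exfalso
          have hin : u ∈ rest.map Prod.fst := List.mem_map.mpr ⟨(u, v), hr, rfl⟩
          exact (List.nodup_cons.mp hG.2.2.2.2.2).1 (hpu ▸ hin)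
      have hne : u ≠ [] := by rw [← hpu]; exact hG.1 pd (by simp)
      have step : pvRep pd.1 pd.2 (u ++ b) = v ++ pvRep pd.1 pd.2 b := by
        rw [hpu, hdv]; exact pvRep_matched u v b hne
      have happ : pvChain rest (v ++ pvRep pd.1 pd.2 b) = v ++ pvChain rest (pvRep pd.1 pd.2 b) := by
        refine pvChain_append rest v (pvRep pd.1 pd.2 b) ?_
        intro pr hp j hj
        have := hG.2.2.2.2.1 pd (by simp) pr (by simp [hp]) j (by rw [hdv]; exact hj)
        rw [hdv] at this
        exact this
      calc pvChain (pd :: rest) (u ++ b)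
          = pvChain rest (v ++ pvRep pd.1 pd.2 b) := by unfold pvChain; rw [List.foldl_cons, step]
        _ = v ++ pvChain rest (pvRep pd.1 pd.2 b) := happ
        _ = v ++ pvChain (pd :: rest) b := rfl
    · have hr : (u, v) ∈ rest := by
        rcases List.mem_cons.mp hm with he | hr
        · exact absurd (by rw [← he]) hpu
        · exact hr
      have step : pvRep pd.1 pd.2 (u ++ b) = u ++ pvRep pd.1 pd.2 b := by
        refine pvRep_append pd.1 pd.2 u b ?_
        intro j hj hpre
        rcases Nat.eq_zero_or_pos j with hj0 | hj1
        · subst hj0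
          simp only [List.drop_zero] at hpre
          exact hG.2.2.2.1 pd (by simp) (u, v) hm hpu
            (by rcases prefix_append_cases hpre with h | h
                · exact Or.inl h
                · exact Or.inr h)
        · have hrel := (List.pairwise_cons.mp hG.2.2.1).1 (u, v) hr
          exact hrel j hj hj1
            (by rcases prefix_append_cases hpre with h | h
                · exact Or.inr h
                · exact Or.inl h)
      calc pvChain (pd :: rest) (u ++ b)
          = pvChain rest (u ++ pvRep pd.1 pd.2 b) := by unfold pvChain; rw [List.foldl_cons, step]
        _ = v ++ pvChain rest (pvRep pd.1 pd.2 b) := ih (pvGood_tail hG) u v _ hr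
        _ = v ++ pvChain (pd :: rest) b := rfl

-- MAIN: on a good token table the chained replaces equal the single left-to-right pass
theorem pvChain_eq_pvScan (prs : List (List Char × List Char)) (hG : pvGood prs) :
    ∀ s : List Char, pvChain prs s = pvScan prs s := by
  intro s
  generalize hn : s.length = n
  induction n using Nat.strong_induction_on generalizing s with
  | _ n ih =>
    subst hn
    cases s with
    | nil => rw [pvChain_nil, pvScan]
    | cons c t =>
      cases hf : prs.find? (fun pr => pr.1.isPrefixOf (c :: t)) with
      | none =>
        have hnp : ∀ pr ∈ prs, ¬ pr.1 <+: c :: t := by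
          intro pr hp hpre
          have := List.find?_eq_none.mp hf pr hp
          simp only [List.isPrefixOf_iff_prefix] at this
          exact this hpre
        rw [pvScan, hf, pvChain_cons prs hG c t hnp, ih t.length (by simp) t rfl]
      | some pr =>
        have hmem : pr ∈ prs := List.mem_of_find?_eq_some hf
        have hp' : pr.1.isPrefixOf (c :: t) = true := by simpa using List.find?_some hf
        have hpre : pr.1 <+: c :: t := List.isPrefixOf_iff_prefix.mp hp'
        have hne : pr.1 ≠ [] := hG.1 pr hmem
        have hlen : 1 ≤ pr.1.length := by
          cases hx : pr.1 with
          | nil => exact absurd hx hne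
          | cons a l => simp
        have hsplit : c :: t = pr.1 ++ (c :: t).drop pr.1.length := by
          rcases hpre with ⟨r, hr⟩
          conv_lhs => rw [← hr]
          congr 1
          rw [← hr, List.drop_left]
        have hdropeq : (c :: t).drop pr.1.length = t.drop (pr.1.length - 1) := by
          cases hx : pr.1.length with
          | zero => omega
          | succ n => simp
        have hlt : ((c :: t).drop pr.1.length).length < (c :: t).length := by
          simp only [List.length_drop, List.length_cons]
          omega
        rw [pvScan, hf]
        conv_lhs => rw [hsplit]
        rw [pvChain_match prs hG pr.1 pr.2 _ (by simpa using hmem),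
          ih ((c :: t).drop pr.1.length).length (by simpa using hlt) _ rfl, hdropeq]

-- the two concrete token tables
def pvFwd : List (List Char × List Char) :=
  [("<sup>".toList, "[^".toList), ("</sup>".toList, "^]".toList),
   ("<sub>".toList, "[_".toList), ("</sub>".toList, "_]".toList),
   ("<i>".toList, "[/".toList), ("</i>".toList, "/]".toList)]

def pvRev : List (List Char × List Char) :=
  [("[^".toList, "<sup>".toList), ("^]".toList, "</sup>".toList),
   ("[_".toList, "<sub>".toList), ("_]".toList, "</sub>".toList),
   ("[/".toList, "<i>".toList), ("/]".toList, "</i>".toList)]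

theorem pvGood_fwd : pvGood pvFwd := by
  unfold pvGood pvFwd pvCompat
  decide

theorem pvGood_rev : pvGood pvRev := by
  unfold pvGood pvRev pvCompat
  decide

-- A's fold, pushed to the char-list level
theorem replace_tags_toList (text : String) (reverse : Bool) :
    (replace_tags text reverse).toList =
      pvChain (if reverse then pvRev else pvFwd) text.toList := by
  cases reverse with
  | false =>
    simp only [replace_tags, List.zip, List.zipWith, List.foldl_cons, List.foldl_nil,
      if_false, Bool.false_eq_true]
    simp only [PySem.Str.toList_replace]
    rw [replace_eq_pvRep _ _ _ (by decide), replace_eq_pvRep _ _ _ (by decide),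
      replace_eq_pvRep _ _ _ (by decide), replace_eq_pvRep _ _ _ (by decide),
      replace_eq_pvRep _ _ _ (by decide), replace_eq_pvRep _ _ _ (by decide)]
    simp [pvChain, pvFwd, List.foldl_cons]
  | true =>
    simp only [replace_tags, List.zip, List.zipWith, List.foldl_cons, List.foldl_nil, if_true]
    simp only [PySem.Str.toList_replace]
    rw [replace_eq_pvRep _ _ _ (by decide), replace_eq_pvRep _ _ _ (by decide),
      replace_eq_pvRep _ _ _ (by decide), replace_eq_pvRep _ _ _ (by decide),
      replace_eq_pvRep _ _ _ (by decide), replace_eq_pvRep _ _ _ (by decide)]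
    simp [pvChain, pvRev, List.foldl_cons]

-- B's scan, at the char-list level
theorem replace_tags_alt_toList (text : String) (reverse : Bool) :
    (replace_tags_alt text reverse).toList =
      pvScan (if reverse then pvRev else pvFwd) text.toList := by
  cases reverse with
  | false =>
    simp only [replace_tags_alt, if_false, Bool.false_eq_true, String.toList_ofList]
    rfl
  | true =>
    simp only [replace_tags_alt, if_true, String.toList_ofList]
    rfl

-- ===== VERDICT (by name: the statement is the Claim_ definition above) =====
theorem replace_tags_spec : Claim_equal_replace_tags := by
  intro text reverse _
  unfold Spec_replace_tags
  apply String.toList_inj.mp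
  rw [replace_tags_toList, replace_tags_alt_toList]
  cases reverse with
  | false => exact pvChain_eq_pvScan pvFwd pvGood_fwd text.toList
  | true => exact pvChain_eq_pvScan pvRev pvGood_rev text.toList
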